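-- pv_equiv track=rewrite | github.com/rtplatsol/shiftsync-api | main.py | pick_best_candidates_for_requirement
-- ===== SOURCE A (Python) =====
-- def get_employee_team_id(employee, team_map):
--     return team_map.get(employee.get("id")) or employee.get("team_id") or ""
--
-- def group_candidates_by_team(candidates, team_map):
--     grouped = {}
--     no_team = []
--
--     for employee, role_source in candidates:
--         team_id = get_employee_team_id(employee, team_map)
--         if team_id:
--             grouped.setdefault(team_id, []).append((employee, role_source))
--         else:
--             no_team.append((employee, role_source))
--
--     return grouped, no_team
--
-- def sort_candidate_pool(candidate_pool, employee_assignment_counts):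
--     return sorted(candidate_pool, key=lambda item: (
--         employee_assignment_counts.get(item[0].get("id"), 0),
--         0 if item[1] == "primary" else 1,
--         (item[0].get("full_name") or "").strip().lower(),
--         item[0].get("id") or ""
--     ))
--
-- def pick_best_candidates_for_requirement(
--     primary_candidates,
--     secondary_candidates,
--     required_staff,
--     team_usage_count,
--     team_map,
--     employee_assignment_counts
-- ):
--     selected = []
--
--     primary_candidates = sort_candidate_pool(primary_candidates, employee_assignment_counts)
--     secondary_candidates = sort_candidate_pool(secondary_candidates, employee_assignment_counts)
--
--     primary_by_team, primary_without_team = group_candidates_by_team(primary_candidates, team_map)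
--     secondary_by_team, secondary_without_team = group_candidates_by_team(secondary_candidates, team_map)
--
--     ordered_primary_teams = sorted(
--         primary_by_team.items(),
--         key=lambda item: (
--             team_usage_count.get(item[0], 0),
--             -len(item[1]),
--             item[0]
--         )
--     )
--
--     for team_id, members in ordered_primary_teams:
--         if len(selected) >= required_staff:
--             break
--         for employee, role_source in members:
--             if len(selected) >= required_staff:
--                 break
--             if any(existing[0].get("id") == employee.get("id") for existing in selected):
--                 continue
--             selected.append((employee, role_source))
--             team_usage_count[team_id] = team_usage_count.get(team_id, 0) + 1
--
--     if len(selected) < required_staff: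
--         for employee, role_source in primary_without_team:
--             if len(selected) >= required_staff:
--                 break
--             if any(existing[0].get("id") == employee.get("id") for existing in selected):
--                 continue
--             selected.append((employee, role_source))
--
--     if len(selected) < required_staff:
--         ordered_secondary_teams = sorted(
--             secondary_by_team.items(),
--             key=lambda item: (
--                 team_usage_count.get(item[0], 0),
--                 -len(item[1]),
--                 item[0]
--             )
--         )
--
--         for team_id, members in ordered_secondary_teams:
--             if len(selected) >= required_staff:
--                 break
--             for employee, role_source in members:
--                 if len(selected) >= required_staff:
--                     break
--                 if any(existing[0].get("id") == employee.get("id") for existing in selected):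
--                     continue
--                 selected.append((employee, role_source))
--                 team_usage_count[team_id] = team_usage_count.get(team_id, 0) + 1
--
--     if len(selected) < required_staff:
--         for employee, role_source in secondary_without_team:
--             if len(selected) >= required_staff:
--                 break
--             if any(existing[0].get("id") == employee.get("id") for existing in selected):
--                 continue
--             selected.append((employee, role_source))
--
--     return selected[:required_staff]
-- ===== SOURCE B (Python) =====
-- def pick_best_candidates_for_requirement(
--     primary_candidates,
--     secondary_candidates,
--     required_staff,
--     team_usage_count,
--     team_map,
--     employee_assignment_counts
-- ):
--     def first_truthy(options):
--         for v in options: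
--             if v:
--                 return v
--         return ""
--
--     def team_of(e):
--         return first_truthy([team_map.get(e.get("id")), e.get("team_id")])
--
--     def rank(e, rs):
--         return (
--             employee_assignment_counts.get(e.get("id"), 0),
--             {"primary": 0}.get(rs, 1),
--             first_truthy([e.get("full_name")]).strip().lower(),
--             first_truthy([e.get("id")]),
--         )
--
--     selected = []
--     seen = set()
--
--     def take(item):
--         if len(selected) < required_staff and item[0].get("id") not in seen:
--             selected.append(item)
--             seen.add(item[0].get("id"))
--             return True
--         return False
--
--     for raw in (primary_candidates, secondary_candidates):
--         tagged = [(team_of(e), (e, rs))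
--                   for e, rs in sorted(raw, key=lambda it: rank(it[0], it[1]))]
--         tids = [t for t, _ in tagged if t]
--         for t in sorted(dict.fromkeys(tids),
--                         key=lambda t: (team_usage_count.get(t, 0), -tids.count(t), t)):
--             for tt, item in tagged:
--                 if tt == t and take(item):
--                     team_usage_count[t] = team_usage_count.get(t, 0) + 1
--         for tt, item in tagged:
--             if not tt:
--                 take(item)
--
--     return selected
-- ===== Notes on version B (the rewrite author's own statement) =====
-- stated objective: alternative
-- what changed: B drops A's group-by-team dict, sorted dict items and per-phase nested loops entirely: one pool loop tags each candidate with its team, lists the non-empty team ids, orders their ordered-dedup (dict.fromkeys) by (usage, -tids.count(t), t) in one flat sort, and a shared take() helper with a seen-id set (instead of A's linear rescans of selected) performs the team pass and the no-team pass as single guarded sweeps over the tagged list.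
import Mathlib
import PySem

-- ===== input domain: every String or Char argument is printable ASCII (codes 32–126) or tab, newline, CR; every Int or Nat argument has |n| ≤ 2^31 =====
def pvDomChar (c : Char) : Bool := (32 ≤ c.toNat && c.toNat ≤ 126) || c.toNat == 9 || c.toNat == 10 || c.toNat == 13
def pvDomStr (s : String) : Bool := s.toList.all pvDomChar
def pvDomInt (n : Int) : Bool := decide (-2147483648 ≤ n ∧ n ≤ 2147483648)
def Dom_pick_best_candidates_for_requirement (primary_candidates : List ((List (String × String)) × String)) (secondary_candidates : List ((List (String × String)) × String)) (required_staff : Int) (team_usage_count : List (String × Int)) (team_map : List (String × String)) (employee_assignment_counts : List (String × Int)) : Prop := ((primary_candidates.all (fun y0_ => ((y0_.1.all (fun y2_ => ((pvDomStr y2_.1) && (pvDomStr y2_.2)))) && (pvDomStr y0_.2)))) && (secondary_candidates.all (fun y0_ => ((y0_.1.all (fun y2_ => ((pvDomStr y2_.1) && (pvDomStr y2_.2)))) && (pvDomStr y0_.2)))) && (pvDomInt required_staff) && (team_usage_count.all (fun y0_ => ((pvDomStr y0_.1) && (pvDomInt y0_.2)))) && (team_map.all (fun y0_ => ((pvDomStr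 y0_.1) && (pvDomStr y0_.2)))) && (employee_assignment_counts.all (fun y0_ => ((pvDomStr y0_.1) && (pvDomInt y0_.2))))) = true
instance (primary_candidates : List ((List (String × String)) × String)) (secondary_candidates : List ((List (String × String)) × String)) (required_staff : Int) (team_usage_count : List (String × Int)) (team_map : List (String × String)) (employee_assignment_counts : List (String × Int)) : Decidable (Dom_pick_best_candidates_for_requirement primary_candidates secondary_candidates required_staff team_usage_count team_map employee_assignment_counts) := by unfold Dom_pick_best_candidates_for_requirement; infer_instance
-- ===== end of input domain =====

-- B replaces A's group-by-team dict, sorted dict items and nested per-phase loops by one pool loop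
-- that tags candidates with their team, orders the ordered-dedup of the non-empty team ids in one
-- flat sort keyed by (usage, -count, id), and selects via a shared take() step with a seen-id set;
-- equivalence is about the return value (both Pythons mutate team_usage_count identically).

abbrev PvEmp := List (String × String)
abbrev PvCand := PvEmp × String

-- ===== PORT A =====

-- Python's  `x or y`  on an optional string (None and "" are falsy)
def pyOrStr (x : Option String) (y : String) : String :=
  match x with
  | some s => if s = "" then y else s
  | none => y

def get_employee_team_id (employee : PvEmp) (team_map : List (String × String)) : String :=
  pyOrStr (match (PySem.Dict.mk employee).get? "id" with
           | some i => (PySem.Dict.mk team_map).get? i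
           | none => none)
    (pyOrStr ((PySem.Dict.mk employee).get? "team_id") "")

def group_candidates_by_team (candidates : List PvCand) (team_map : List (String × String)) :
    PySem.Dict String (List PvCand) × List PvCand :=
  candidates.foldl
    (fun st c =>
      let team_id := get_employee_team_id c.1 team_map
      if team_id ≠ "" then (st.1.modify team_id [] (· ++ [c]), st.2)   -- grouped.setdefault(team_id, []).append(c)
      else (st.1, st.2 ++ [c]))
    (PySem.Dict.empty, [])

def sort_candidate_pool (candidate_pool : List PvCand) (employee_assignment_counts : List (String × Int)) :
    List PvCand :=
  PySem.List.sorted2 candidate_pool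
    (fun item => toLex (
        (match (PySem.Dict.mk item.1).get? "id" with
         | some i => (PySem.Dict.mk employee_assignment_counts).getD i 0
         | none => 0),
        (if item.2 = "primary" then (0 : Int) else 1)))
    (fun item => toLex (
        PySem.Str.lower (PySem.Str.strip (pyOrStr ((PySem.Dict.mk item.1).get? "full_name") "")),
        pyOrStr ((PySem.Dict.mk item.1).get? "id") ""))
    false

-- `any(existing[0].get("id") == employee.get("id") for existing in selected)`
def pvSelAnyDup (selected : List PvCand) (employee : PvEmp) : Bool :=
  selected.any (fun existing => (PySem.Dict.mk existing.1).get? "id" == (PySem.Dict.mk employee).get? "id")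

-- the inner `for employee, role_source in members` loop (break returns the state)
def pick_team_members_loop (required_staff : Int) (team_id : String) :
    List PvCand → List PvCand → PySem.Dict String Int → List PvCand × PySem.Dict String Int
  | [], selected, usage => (selected, usage)
  | c :: members, selected, usage =>
    if required_staff ≤ PySem.List.len selected then (selected, usage)
    else if pvSelAnyDup selected c.1 then pick_team_members_loop required_staff team_id members selected usage
    else pick_team_members_loop required_staff team_id members (selected ++ [c])
           (usage.insert team_id (usage.getD team_id 0 + 1))

-- the outer `for team_id, members in ordered_teams` loop
def pick_teams_loop (required_staff : Int) :
    List (String × List PvCand) → List PvCand → PySem.Dict String Int → List PvCand × PySem.Dict String Int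
  | [], selected, usage => (selected, usage)
  | (team_id, members) :: rest, selected, usage =>
    if required_staff ≤ PySem.List.len selected then (selected, usage)
    else
      let su := pick_team_members_loop required_staff team_id members selected usage
      pick_teams_loop required_staff rest su.1 su.2

-- `for employee, role_source in …_without_team`
def pick_no_team_loop (required_staff : Int) : List PvCand → List PvCand → List PvCand
  | [], selected => selected
  | c :: rest, selected =>
    if required_staff ≤ PySem.List.len selected then selected
    else if pvSelAnyDup selected c.1 then pick_no_team_loop required_staff rest selected
    else pick_no_team_loop required_staff rest (selected ++ [c])

def pvTeamSortKey1 (usage : PySem.Dict String Int) (item : String × List PvCand) : Lex (Int × Int) :=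
  toLex (usage.getD item.1 0, -(PySem.List.len item.2))

def pick_best_candidates_for_requirement (primary_candidates : List ((List (String × String)) × String)) (secondary_candidates : List ((List (String × String)) × String)) (required_staff : Int) (team_usage_count : List (String × Int)) (team_map : List (String × String)) (employee_assignment_counts : List (String × Int)) : List ((List (String × String)) × String) :=
  let primary := sort_candidate_pool primary_candidates employee_assignment_counts
  let secondary := sort_candidate_pool secondary_candidates employee_assignment_counts
  let pg := group_candidates_by_team primary team_map
  let sg := group_candidates_by_team secondary team_map
  let usage0 := PySem.Dict.mk team_usage_count
  let ordered_primary := PySem.List.sorted2 pg.1.items (pvTeamSortKey1 usage0) (·.1) false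
  let r1 := pick_teams_loop required_staff ordered_primary [] usage0
  let sel2 := if PySem.List.len r1.1 < required_staff then pick_no_team_loop required_staff pg.2 r1.1 else r1.1
  let r3 := if PySem.List.len sel2 < required_staff then
      pick_teams_loop required_staff (PySem.List.sorted2 sg.1.items (pvTeamSortKey1 r1.2) (·.1) false) sel2 r1.2
    else (sel2, r1.2)
  let sel4 := if PySem.List.len r3.1 < required_staff then pick_no_team_loop required_staff sg.2 r3.1 else r3.1
  PySem.List.slice sel4 none (some required_staff)

-- ===== PORT B =====

-- `first_truthy(options)`: the first non-empty string among the optional values, else ""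
def firstTruthy : List (Option String) → String
  | [] => ""
  | none :: rest => firstTruthy rest
  | some s :: rest => if s = "" then firstTruthy rest else s

def pvTeamOfB (team_map : List (String × String)) (e : PvEmp) : String :=
  firstTruthy [ (match (PySem.Dict.mk e).get? "id" with
                 | some i => (PySem.Dict.mk team_map).get? i
                 | none => none),
                (PySem.Dict.mk e).get? "team_id" ]

-- the four components of `rank(e, rs)`
def pvRank1 (employee_assignment_counts : List (String × Int)) (e : PvEmp) : Int :=
  match (PySem.Dict.mk e).get? "id" with
  | some i => (PySem.Dict.mk employee_assignment_counts).getD i 0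
  | none => 0

def pvRank2 (rs : String) : Int := (PySem.Dict.mk [("primary", (0 : Int))]).getD rs 1

def pvRank3 (e : PvEmp) : String :=
  PySem.Str.lower (PySem.Str.strip (firstTruthy [(PySem.Dict.mk e).get? "full_name"]))

def pvRank4 (e : PvEmp) : String := firstTruthy [(PySem.Dict.mk e).get? "id"]

-- one step of Python's tuple comparison: this component decides, ties fall through to `next`
def pvCmp {κ : Type} [LT κ] [DecidableLT κ] [DecidableEq κ] (x y : κ) (next : Bool) : Bool :=
  decide (x < y) || (decide (x = y) && next)

-- `rank(a) < rank(b)` spelled out over the four components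
def pvRankLt (employee_assignment_counts : List (String × Int)) (a b : PvCand) : Bool :=
  pvCmp (pvRank1 employee_assignment_counts a.1) (pvRank1 employee_assignment_counts b.1)
    (pvCmp (pvRank2 a.2) (pvRank2 b.2)
      (pvCmp (pvRank3 a.1) (pvRank3 b.1)
        (pvCmp (pvRank4 a.1) (pvRank4 b.1) false)))

-- `(team_usage_count.get(t,0), -tids.count(t), t)` comparison for the team order
def pvTeamLt (usage : PySem.Dict String Int) (tids : List String) (a b : String) : Bool :=
  pvCmp (usage.getD a 0) (usage.getD b 0)
    (pvCmp (-(tids.count a : Int)) (-(tids.count b : Int)) (pvCmp a b false))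

abbrev PvSel := List PvCand × PySem.Set (Option String)
abbrev PvStB := List PvCand × PySem.Set (Option String) × PySem.Dict String Int

-- `take(item)`: append under the quota when the id is unseen; report whether it fired
def pvTake (k : Int) (st : PvSel) (item : PvCand) : PvSel × Bool :=
  if decide (PySem.List.len st.1 < k)
      && !(PySem.Set.contains st.2 ((PySem.Dict.mk item.1).get? "id")) then
    ((st.1 ++ [item], PySem.Set.add st.2 ((PySem.Dict.mk item.1).get? "id")), true)
  else (st, false)

-- body of the team sweep: on a team hit, a successful take() also bumps the usage counter
def pvStepT (k : Int) (t : String) (st : PvStB) (p : String × PvCand) : PvStB :=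
  if p.1 == t then
    match pvTake k (st.1, st.2.1) p.2 with
    | (s, true) => (s.1, s.2, st.2.2.insert t (st.2.2.getD t 0 + 1))
    | (s, false) => (s.1, s.2, st.2.2)
  else st

-- body of the no-team sweep
def pvStepN (k : Int) (st : PvSel) (p : String × PvCand) : PvSel :=
  if p.1 == "" then (pvTake k st p.2).1 else st

-- one iteration of `for raw in (primary_candidates, secondary_candidates)`
def pvProcessPool (k : Int) (team_map : List (String × String))
    (employee_assignment_counts : List (String × Int)) (raw : List PvCand) (st : PvStB) : PvStB :=
  let tagged := (raw.foldl (fun acc x =>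
      PySem.List.insertBy (pvRankLt employee_assignment_counts) x acc) []).map
      (fun c => (pvTeamOfB team_map c.1, c))
  let tids := (tagged.map Prod.fst).filter (fun t => t != "")
  let st1 := ((PySem.List.dedup tids).foldl (fun acc t =>
      PySem.List.insertBy (pvTeamLt st.2.2 tids) t acc) []).foldl
      (fun s t => tagged.foldl (pvStepT k t) s) st
  let f := tagged.foldl (pvStepN k) (st1.1, st1.2.1)
  (f.1, f.2, st1.2.2)

def pick_best_candidates_for_requirement_alt (primary_candidates : List ((List (String × String)) × String)) (secondary_candidates : List ((List (String × String)) × String)) (required_staff : Int) (team_usage_count : List (String × Int)) (team_map : List (String × String)) (employee_assignment_counts : List (String × Int)) : List ((List (String × String)) × String) :=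
  ([primary_candidates, secondary_candidates].foldl
      (fun st raw => pvProcessPool required_staff team_map employee_assignment_counts raw st)
      ([], PySem.Set.empty, PySem.Dict.mk team_usage_count)).1

-- ===== PRECONDITION & SPEC =====
-- (no Pre_: the Python A returns normally on every well-typed input)
def Spec_pick_best_candidates_for_requirement (primary_candidates : List ((List (String × String)) × String)) (secondary_candidates : List ((List (String × String)) × String)) (required_staff : Int) (team_usage_count : List (String × Int)) (team_map : List (String × String)) (employee_assignment_counts : List (String × Int)) (out : List ((List (String × String)) × String)) : Prop := out = pick_best_candidates_for_requirement_alt primary_candidates secondary_candidates required_staff team_usage_count team_map employee_assignment_counts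
instance (primary_candidates : List ((List (String × String)) × String)) (secondary_candidates : List ((List (String × String)) × String)) (required_staff : Int) (team_usage_count : List (String × Int)) (team_map : List (String × String)) (employee_assignment_counts : List (String × Int)) (out : List ((List (String × String)) × String)) : Decidable (Spec_pick_best_candidates_for_requirement primary_candidates secondary_candidates required_staff team_usage_count team_map employee_assignment_counts out) := by unfold Spec_pick_best_candidates_for_requirement; infer_instance

-- ===== CLAIM (what is proved, stated in full; the proofs are below) =====
def Claim_equal_pick_best_candidates_for_requirement : Prop := ∀ (primary_candidates : List ((List (String × String)) × String)) (secondary_candidates : List ((List (String × String)) × String)) (required_staff : Int) (team_usage_count : List (String × Int)) (team_map : List (String × String)) (employee_assignment_counts : List (String × Int)), Dom_pick_best_candidates_for_requirement primary_candidates secondary_candidates required_staff team_usage_count team_map employee_assignment_counts → Spec_pick_best_candidates_for_requirement primary_candidates secondary_candidates required_staff team_usage_count team_map employee_assignment_counts (pick_best_candidates_for_requirement primary_candidates secondary_candidates required_staff team_usage_count team_map employee_assignment_counts)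

-- ===== LEMMAS AND PROOFS =====

-- ===== proof-side helpers =====
def pvIdOf (c : PvCand) : Option String := (PySem.Dict.mk c.1).get? "id"

def pvInv (seen : List (Option String)) (sel : List PvCand) : Prop :=
  ∀ x, x ∈ seen ↔ ∃ c ∈ sel, pvIdOf c = x

def pvGStep (k : Int) (t : String) (st : PvStB) (c : PvCand) : PvStB :=
  if decide (PySem.List.len st.1 < k) && !(PySem.Set.contains st.2.1 (pvIdOf c))
  then (st.1 ++ [c], PySem.Set.add st.2.1 (pvIdOf c), st.2.2.insert t (st.2.2.getD t 0 + 1))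
  else st

def pvGStepF (k : Int) (st : PvSel) (c : PvCand) : PvSel :=
  if decide (PySem.List.len st.1 < k) && !(PySem.Set.contains st.2 (pvIdOf c))
  then (st.1 ++ [c], PySem.Set.add st.2 (pvIdOf c))
  else st

-- A's two sort keys, named (sort_candidate_pool = sorted2 with these; rfl)
def pvKeyA1 (employee_assignment_counts : List (String × Int)) (item : PvCand) : Lex (Int × Int) :=
  toLex (
    (match (PySem.Dict.mk item.1).get? "id" with
     | some i => (PySem.Dict.mk employee_assignment_counts).getD i 0
     | none => 0),
    (if item.2 = "primary" then (0 : Int) else 1))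

def pvKeyA2 (item : PvCand) : Lex (String × String) :=
  toLex (
    PySem.Str.lower (PySem.Str.strip (pyOrStr ((PySem.Dict.mk item.1).get? "full_name") "")),
    pyOrStr ((PySem.Dict.mk item.1).get? "id") "")

-- B's truthiness helper vs A's `or` chains
lemma firstTruthy_one (o : Option String) : firstTruthy [o] = pyOrStr o "" := by
  cases o with
  | none => rfl
  | some s => by_cases h : s = "" <;> simp [firstTruthy, pyOrStr, h]

lemma firstTruthy_two (o1 o2 : Option String) :
    firstTruthy [o1, o2] = pyOrStr o1 (pyOrStr o2 "") := by
  cases o1 with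
  | none => exact firstTruthy_one o2
  | some s =>
    by_cases h : s = "" <;> simp [firstTruthy, pyOrStr, h, firstTruthy_one o2]

lemma pvTeamOfB_eq (tm : List (String × String)) (e : PvEmp) :
    pvTeamOfB tm e = get_employee_team_id e tm := by
  unfold pvTeamOfB get_employee_team_id
  rw [firstTruthy_two]

lemma pvRoleKey_eq (rs : String) :
    (PySem.Dict.mk [("primary", (0 : Int))]).getD rs 1 = if rs = "primary" then (0 : Int) else 1 := by
  by_cases h : rs = "primary"
  · simp [PySem.Dict.getD, PySem.Dict.get?, h]
  · simp [PySem.Dict.getD, PySem.Dict.get?, Ne.symm h]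
    exact h

-- Python's tuple-key sort as a single Lex-key sort (bridge between sorted2 and sorted)
lemma pvSorted2_eq_sorted {α : Type} {κ₁ κ₂ : Type} [LinearOrder κ₁] [LinearOrder κ₂]
    (xs : List α) (k1 : α → κ₁) (k2 : α → κ₂) :
    PySem.List.sorted2 xs k1 k2 false
      = PySem.List.sorted xs (fun x => toLex (k1 x, k2 x)) false := by
  have hcmp : (fun (a b : α) => decide (k1 a < k1 b) || (!decide (k1 b < k1 a) && decide (k2 a < k2 b)))
      = (fun a b => decide (toLex (k1 a, k2 a) < toLex (k1 b, k2 b))) := by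
    funext a b
    rw [Bool.eq_iff_iff]
    simp only [Bool.or_eq_true, Bool.and_eq_true, Bool.not_eq_true', decide_eq_true_eq,
      decide_eq_false_iff_not, Prod.Lex.toLex_lt_toLex]
    constructor
    · rintro (h | ⟨h1, h2⟩)
      · exact Or.inl h
      · rcases lt_trichotomy (k1 a) (k1 b) with h | h | h
        · exact Or.inl h
        · exact Or.inr ⟨h, h2⟩
        · exact absurd h h1
    · rintro (h | ⟨h1, h2⟩)
      · exact Or.inl h
      · exact Or.inr ⟨by rw [h1]; exact lt_irrefl _, h2⟩
  simp only [PySem.List.sorted2, PySem.List.sorted]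
  rw [hcmp]
  simp

-- a pvCmp pair folds into one Lex comparison
lemma pvCmp_lex {κ₁ κ₂ : Type} [LinearOrder κ₁] [LinearOrder κ₂]
    (x1 y1 : κ₁) (x2 y2 : κ₂) (n : Bool) :
    pvCmp x1 y1 (pvCmp x2 y2 n) = pvCmp (toLex (x1, x2)) (toLex (y1, y2)) n := by
  rw [Bool.eq_iff_iff]
  simp only [pvCmp, Bool.or_eq_true, Bool.and_eq_true, decide_eq_true_eq,
    Prod.Lex.toLex_lt_toLex, toLex_inj, Prod.mk.injEq]
  tauto

lemma pvCmp_false {κ : Type} [LinearOrder κ] (x y : κ) :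
    pvCmp x y false = decide (x < y) := by
  simp [pvCmp]

-- a two-level pvCmp chain is exactly sorted2's comparison
lemma pvCmp_sorted2cmp {κ₁ κ₂ : Type} [LinearOrder κ₁] [LinearOrder κ₂]
    (a1 b1 : κ₁) (a2 b2 : κ₂) :
    pvCmp a1 b1 (pvCmp a2 b2 false)
      = (decide (a1 < b1) || (!decide (b1 < a1) && decide (a2 < b2))) := by
  rw [Bool.eq_iff_iff]
  simp only [pvCmp, Bool.or_eq_true, Bool.and_eq_true, Bool.not_eq_true', decide_eq_true_eq,
    decide_eq_false_iff_not, Bool.and_false, Bool.or_false]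
  constructor
  · rintro (h | ⟨h1, h2⟩)
    · exact Or.inl h
    · exact Or.inr ⟨by rw [h1]; exact lt_irrefl _, h2⟩
  · rintro (h | ⟨h1, h2⟩)
    · exact Or.inl h
    · rcases lt_trichotomy a1 b1 with h' | h' | h'
      · exact Or.inl h'
      · exact Or.inr ⟨h', h2⟩
      · exact absurd h' h1

-- B's component-wise rank comparison is A's tuple-key comparison
lemma pvRankLt_eq (eac : List (String × Int)) (a b : PvCand) :
    pvRankLt eac a b
      = (decide (pvKeyA1 eac a < pvKeyA1 eac b)
          || (!decide (pvKeyA1 eac b < pvKeyA1 eac a) && decide (pvKeyA2 a < pvKeyA2 b))) := by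
  have h1 : ∀ x : PvCand, toLex (pvRank1 eac x.1, pvRank2 x.2) = pvKeyA1 eac x := by
    intro x
    unfold pvRank1 pvRank2 pvKeyA1
    rw [pvRoleKey_eq]
  have h2 : ∀ x : PvCand, toLex (pvRank3 x.1, pvRank4 x.1) = pvKeyA2 x := by
    intro x
    unfold pvRank3 pvRank4 pvKeyA2
    rw [firstTruthy_one, firstTruthy_one]
  unfold pvRankLt
  rw [pvCmp_lex (pvRank3 a.1) (pvRank3 b.1) (pvRank4 a.1) (pvRank4 b.1) false,
    pvCmp_lex (pvRank1 eac a.1) (pvRank1 eac b.1) (pvRank2 a.2) (pvRank2 b.2)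
      (pvCmp (toLex (pvRank3 a.1, pvRank4 a.1)) (toLex (pvRank3 b.1, pvRank4 b.1)) false),
    pvCmp_sorted2cmp, h1 a, h1 b, h2 a, h2 b]

-- B's insertion-sort loop over the pool is A's sort_candidate_pool
lemma pvPoolSort_eq (eac : List (String × Int)) (raw : List PvCand) :
    raw.foldl (fun acc x => PySem.List.insertBy (pvRankLt eac) x acc) []
      = sort_candidate_pool raw eac := by
  rw [show sort_candidate_pool raw eac
      = raw.foldl (fun acc x => PySem.List.insertBy
          (fun a b => decide (pvKeyA1 eac a < pvKeyA1 eac b)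
            || (!decide (pvKeyA1 eac b < pvKeyA1 eac a) && decide (pvKeyA2 a < pvKeyA2 b))) x acc) []
    from rfl]
  have hc : pvRankLt eac = fun a b => decide (pvKeyA1 eac a < pvKeyA1 eac b)
      || (!decide (pvKeyA1 eac b < pvKeyA1 eac a) && decide (pvKeyA2 a < pvKeyA2 b)) := by
    funext a b; exact pvRankLt_eq eac a b
  rw [hc]

-- B's insertion-sort loop over the team ids is a Lex-keyed PySem sort
lemma pvTeamSort_eq (usage : PySem.Dict String Int) (tids : List String) :
    (PySem.List.dedup tids).foldl (fun acc t =>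
        PySem.List.insertBy (pvTeamLt usage tids) t acc) []
      = PySem.List.sorted (PySem.List.dedup tids)
          (fun t => toLex (usage.getD t 0, toLex (-(tids.count t : Int), t))) false := by
  rw [PySem.List.sorted_eq_foldl_insertBy]
  have hc : pvTeamLt usage tids = fun a b =>
      decide (toLex (usage.getD a 0, toLex (-(tids.count a : Int), a))
        < toLex (usage.getD b 0, toLex (-(tids.count b : Int), b))) := by
    funext a b
    unfold pvTeamLt
    rw [pvCmp_lex (-(tids.count a : Int)) (-(tids.count b : Int)) a b false,
      pvCmp_lex (usage.getD a 0) (usage.getD b 0)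
        (toLex (-(tids.count a : Int), a)) (toLex (-(tids.count b : Int), b)) false,
      pvCmp_false]
  rw [hc]

-- a fired/unfired take() with the usage bump folded in IS the guarded step pvGStep
lemma pvTake_gstep (k : Int) (t : String) (acc : PvStB) (c : PvCand) :
    (match pvTake k (acc.1, acc.2.1) c with
      | (s, true) => (s.1, s.2, acc.2.2.insert t (acc.2.2.getD t 0 + 1))
      | (s, false) => (s.1, s.2, acc.2.2)) = pvGStep k t acc c := by
  by_cases hc : (decide (PySem.List.len acc.1 < k)
      && !(PySem.Set.contains acc.2.1 ((PySem.Dict.mk c.1).get? "id"))) = true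
  · rw [show pvTake k (acc.1, acc.2.1) c
        = ((acc.1 ++ [c], PySem.Set.add acc.2.1 ((PySem.Dict.mk c.1).get? "id")), true) from by
        unfold pvTake; rw [if_pos hc],
      show pvGStep k t acc c = (acc.1 ++ [c], PySem.Set.add acc.2.1 (pvIdOf c),
        acc.2.2.insert t (acc.2.2.getD t 0 + 1)) from by unfold pvGStep pvIdOf; rw [if_pos hc]]
    rfl
  · rw [show pvTake k (acc.1, acc.2.1) c = ((acc.1, acc.2.1), false) from by
        unfold pvTake; rw [if_neg hc],
      show pvGStep k t acc c = acc from by unfold pvGStep pvIdOf; rw [if_neg hc]]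

lemma pvTake_gstepF (k : Int) (acc : PvSel) (c : PvCand) :
    (pvTake k acc c).1 = pvGStepF k acc c := by
  by_cases hc : (decide (PySem.List.len acc.1 < k)
      && !(PySem.Set.contains acc.2 ((PySem.Dict.mk c.1).get? "id"))) = true
  · rw [show pvTake k acc c
        = ((acc.1 ++ [c], PySem.Set.add acc.2 ((PySem.Dict.mk c.1).get? "id")), true) from by
        unfold pvTake; rw [if_pos hc],
      show pvGStepF k acc c = (acc.1 ++ [c], PySem.Set.add acc.2 (pvIdOf c)) from by
        unfold pvGStepF pvIdOf; rw [if_pos hc]]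
    rfl
  · rw [show pvTake k acc c = (acc, false) from by unfold pvTake; rw [if_neg hc],
      show pvGStepF k acc c = acc from by unfold pvGStepF pvIdOf; rw [if_neg hc]]

-- reduction of B's team sweep over `tagged` to a pass over the team's members
lemma pvStepT_tagged_reduce (tm : List (String × String)) (pool : List PvCand) (k : Int) (t : String)
    (st : PvStB) :
    (pool.map (fun c => (get_employee_team_id c.1 tm, c))).foldl (pvStepT k t) st
      = (pool.filter (fun c => get_employee_team_id c.1 tm == t)).foldl (pvGStep k t) st := by
  rw [List.foldl_map]
  have h : ∀ (acc : PvStB), ∀ c ∈ pool,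
      pvStepT k t acc (get_employee_team_id c.1 tm, c)
        = (fun acc c => if (get_employee_team_id c.1 tm == t) then pvGStep k t acc c else acc) acc c := by
    intro acc c _
    by_cases h : get_employee_team_id c.1 tm == t
    · rw [show pvStepT k t acc (get_employee_team_id c.1 tm, c)
          = (match pvTake k (acc.1, acc.2.1) c with
              | (s, true) => (s.1, s.2, acc.2.2.insert t (acc.2.2.getD t 0 + 1))
              | (s, false) => (s.1, s.2, acc.2.2)) from by unfold pvStepT; rw [if_pos h],
        pvTake_gstep]
      simp only [h, if_true]
    · rw [show pvStepT k t acc (get_employee_team_id c.1 tm, c) = acc from by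
          unfold pvStepT; rw [if_neg (by simpa using h)]]
      simp [h]
  rw [PySem.List.foldl_congr_mem _ _ _ _ h, PySem.List.foldl_if_eq_foldl_filter]

lemma pvStepN_tagged_reduce (tm : List (String × String)) (pool : List PvCand) (k : Int)
    (st : PvSel) :
    (pool.map (fun c => (get_employee_team_id c.1 tm, c))).foldl (pvStepN k) st
      = (pool.filter (fun c => get_employee_team_id c.1 tm == "")).foldl (pvGStepF k) st := by
  rw [List.foldl_map]
  have h : ∀ acc, ∀ c ∈ pool,
      pvStepN k acc (get_employee_team_id c.1 tm, c)
        = (fun acc c => if (get_employee_team_id c.1 tm == "") then pvGStepF k acc c else acc) acc c := by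
    intro acc c _
    by_cases h : get_employee_team_id c.1 tm == ""
    · rw [show pvStepN k acc (get_employee_team_id c.1 tm, c) = (pvTake k acc c).1 from by
          unfold pvStepN; rw [if_pos h],
        pvTake_gstepF]
      simp only [h, if_true]
    · rw [show pvStepN k acc (get_employee_team_id c.1 tm, c) = acc from by
          unfold pvStepN; rw [if_neg (by simpa using h)]]
      simp [h]
  rw [PySem.List.foldl_congr_mem _ _ _ _ h, PySem.List.foldl_if_eq_foldl_filter]

-- B's loops stall once the quota is reached
lemma pvGStep_stall (k : Int) (t : String) (l : List PvCand) (sel seen usage)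
    (h : ¬ PySem.List.len sel < k) :
    l.foldl (pvGStep k t) (sel, seen, usage) = (sel, seen, usage) := by
  induction l with
  | nil => rfl
  | cons c l ih =>
    rw [List.foldl_cons, show pvGStep k t (sel, seen, usage) c = (sel, seen, usage) by
      simp only [PySem.List.len_eq] at h; simp [pvGStep, h], ih]

lemma pvStepT_stall (k : Int) (t : String) (l : List (String × PvCand)) (sel seen usage)
    (h : ¬ PySem.List.len sel < k) :
    l.foldl (pvStepT k t) (sel, seen, usage) = (sel, seen, usage) := by
  induction l with
  | nil => rfl
  | cons c l ih =>
    rw [List.foldl_cons, show pvStepT k t (sel, seen, usage) c = (sel, seen, usage) by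
      by_cases hc : c.1 == t
      · rw [show pvStepT k t (sel, seen, usage) c
            = (match pvTake k ((sel, seen, usage).1, (sel, seen, usage).2.1) c.2 with
                | (s, true) => (s.1, s.2, ((sel, seen, usage) : PvStB).2.2.insert t
                    (((sel, seen, usage) : PvStB).2.2.getD t 0 + 1))
                | (s, false) => (s.1, s.2, ((sel, seen, usage) : PvStB).2.2)) from by
            unfold pvStepT; rw [if_pos hc],
          pvTake_gstep]
        simp only [PySem.List.len_eq] at h
        simp [pvGStep, h]
      · unfold pvStepT; rw [if_neg (by simpa using hc)], ih]

lemma pvGStepF_stall (k : Int) (l : List PvCand) (sel seen)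
    (h : ¬ PySem.List.len sel < k) :
    l.foldl (pvGStepF k) (sel, seen) = (sel, seen) := by
  induction l with
  | nil => rfl
  | cons c l ih =>
    rw [List.foldl_cons, show pvGStepF k (sel, seen) c = (sel, seen) by
      simp only [PySem.List.len_eq] at h; simp [pvGStepF, h], ih]

lemma pvTeams_stall (k : Int) (tagged : List (String × PvCand)) (ts : List String) (sel seen usage)
    (h : ¬ PySem.List.len sel < k) :
    ts.foldl (fun st t => tagged.foldl (pvStepT k t) st) (sel, seen, usage) = (sel, seen, usage) := by
  induction ts with
  | nil => rfl
  | cons t ts ih => simp only [List.foldl_cons, pvStepT_stall k t tagged sel seen usage h, ih]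

-- A's duplicate scan equals B's seen-set test under the invariant
lemma pvDup_eq (sel : List PvCand) (seen : List (Option String)) (hInv : pvInv seen sel)
    (c : PvCand) : pvSelAnyDup sel c.1 = PySem.Set.contains seen (pvIdOf c) := by
  rw [Bool.eq_iff_iff]
  simp only [pvSelAnyDup, List.any_eq_true, beq_iff_eq]
  rw [PySem.Set.contains_iff, hInv (pvIdOf c)]
  constructor
  · rintro ⟨e, he, h⟩; exact ⟨e, he, h⟩
  · rintro ⟨e, he, h⟩; exact ⟨e, he, h⟩

-- quota-reached short-circuits of A's loops
lemma pick_no_team_loop_skip (k : Int) (l : List PvCand) (sel : List PvCand)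
    (h : k ≤ PySem.List.len sel) : pick_no_team_loop k l sel = sel := by
  cases l with
  | nil => rfl
  | cons c rest => rw [show pick_no_team_loop k (c :: rest) sel
      = if k ≤ PySem.List.len sel then sel
        else if pvSelAnyDup sel c.1 then pick_no_team_loop k rest sel
        else pick_no_team_loop k rest (sel ++ [c]) from rfl, if_pos h]

lemma pick_teams_loop_skip (k : Int) (ts : List (String × List PvCand)) (sel : List PvCand)
    (usage : PySem.Dict String Int) (h : k ≤ PySem.List.len sel) :
    pick_teams_loop k ts sel usage = (sel, usage) := by
  cases ts with
  | nil => rfl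
  | cons p rest => rw [show pick_teams_loop k (p :: rest) sel usage
      = if k ≤ PySem.List.len sel then (sel, usage) else _ from rfl, if_pos h]

-- A's loops never push `selected` beyond the quota
lemma pick_team_members_loop_len (k : Int) (t : String) (ms : List PvCand) :
    ∀ (sel : List PvCand) usage, sel.length ≤ k.toNat →
      (pick_team_members_loop k t ms sel usage).1.length ≤ k.toNat := by
  induction ms with
  | nil => intro sel usage h; exact h
  | cons c ms ih =>
    intro sel usage h
    by_cases hk : k ≤ PySem.List.len sel
    · rw [show pick_team_members_loop k t (c :: ms) sel usage
          = if k ≤ PySem.List.len sel then (sel, usage)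
            else if pvSelAnyDup sel c.1 then pick_team_members_loop k t ms sel usage
            else pick_team_members_loop k t ms (sel ++ [c])
              (usage.insert t (usage.getD t 0 + 1)) from rfl, if_pos hk]
      exact h
    · rw [show pick_team_members_loop k t (c :: ms) sel usage
          = if k ≤ PySem.List.len sel then (sel, usage)
            else if pvSelAnyDup sel c.1 then pick_team_members_loop k t ms sel usage
            else pick_team_members_loop k t ms (sel ++ [c])
              (usage.insert t (usage.getD t 0 + 1)) from rfl, if_neg hk]
      by_cases hd : pvSelAnyDup sel c.1
      · rw [if_pos hd]; exact ih sel usage h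
      · rw [if_neg hd]
        refine ih _ _ ?_
        simp only [PySem.List.len_eq] at hk
        simp only [List.length_append, List.length_cons, List.length_nil]
        omega

lemma pick_teams_loop_len (k : Int) (ts : List (String × List PvCand)) :
    ∀ (sel : List PvCand) usage, sel.length ≤ k.toNat →
      (pick_teams_loop k ts sel usage).1.length ≤ k.toNat := by
  induction ts with
  | nil => intro sel usage h; exact h
  | cons p ts ih =>
    intro sel usage h
    obtain ⟨t, ms⟩ := p
    by_cases hk : k ≤ PySem.List.len sel
    · rw [pick_teams_loop_skip k ((t, ms) :: ts) sel usage hk]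
      exact h
    · rw [show pick_teams_loop k ((t, ms) :: ts) sel usage
          = if k ≤ PySem.List.len sel then (sel, usage)
            else pick_teams_loop k ts (pick_team_members_loop k t ms sel usage).1
                   (pick_team_members_loop k t ms sel usage).2 from rfl, if_neg hk]
      exact ih _ _ (pick_team_members_loop_len k t ms sel usage h)

lemma pick_no_team_loop_len (k : Int) (l : List PvCand) :
    ∀ (sel : List PvCand), sel.length ≤ k.toNat →
      (pick_no_team_loop k l sel).length ≤ k.toNat := by
  induction l with
  | nil => intro sel h; exact h
  | cons c l ih =>
    intro sel h
    by_cases hk : k ≤ PySem.List.len sel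
    · rw [pick_no_team_loop_skip k (c :: l) sel hk]
      exact h
    · rw [show pick_no_team_loop k (c :: l) sel
          = if k ≤ PySem.List.len sel then sel
            else if pvSelAnyDup sel c.1 then pick_no_team_loop k l sel
            else pick_no_team_loop k l (sel ++ [c]) from rfl, if_neg hk]
      by_cases hd : pvSelAnyDup sel c.1
      · rw [if_pos hd]; exact ih sel h
      · rw [if_neg hd]
        refine ih _ ?_
        simp only [PySem.List.len_eq] at hk
        simp only [List.length_append, List.length_cons, List.length_nil]
        omega

-- inner-loop correspondence
lemma pvInner_corr (k : Int) (t : String) (ms : List PvCand) :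
    ∀ (sel : List PvCand) (seen : PySem.Set (Option String)) (usage : PySem.Dict String Int),
      pvInv seen sel →
      ∃ seen', ms.foldl (pvGStep k t) (sel, seen, usage)
          = ((pick_team_members_loop k t ms sel usage).1, seen',
             (pick_team_members_loop k t ms sel usage).2)
        ∧ pvInv seen' (pick_team_members_loop k t ms sel usage).1 := by
  induction ms with
  | nil => intro sel seen usage hInv; exact ⟨seen, rfl, hInv⟩
  | cons c ms ih =>
    intro sel seen usage hInv
    rw [show pick_team_members_loop k t (c :: ms) sel usage
        = if k ≤ PySem.List.len sel then (sel, usage)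
          else if pvSelAnyDup sel c.1 then pick_team_members_loop k t ms sel usage
          else pick_team_members_loop k t ms (sel ++ [c])
            (usage.insert t (usage.getD t 0 + 1)) from rfl]
    by_cases hk : k ≤ PySem.List.len sel
    · rw [if_pos hk]
      refine ⟨seen, ?_, hInv⟩
      have hlt : ¬ PySem.List.len sel < k := by omega
      rw [List.foldl_cons, show pvGStep k t (sel, seen, usage) c = (sel, seen, usage) by
        simp only [PySem.List.len_eq] at hlt; simp [pvGStep, hlt],
        pvGStep_stall k t ms sel seen usage hlt]
    · rw [if_neg hk]
      have hlt : PySem.List.len sel < k := by omega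
      have hdup := pvDup_eq sel seen hInv c
      by_cases hd : pvSelAnyDup sel c.1
      · rw [if_pos hd]
        have hstep : pvGStep k t (sel, seen, usage) c = (sel, seen, usage) := by
          have hmem : pvIdOf c ∈ seen := (PySem.Set.contains_iff seen (pvIdOf c)).mp
            (by rw [← hdup]; exact hd)
          simp [pvGStep, hmem]
        rw [List.foldl_cons, hstep]
        exact ih sel seen usage hInv
      · rw [if_neg hd]
        have hstep : pvGStep k t (sel, seen, usage) c
            = (sel ++ [c], PySem.Set.add seen (pvIdOf c), usage.insert t (usage.getD t 0 + 1)) := by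
          have hc : PySem.Set.contains seen (pvIdOf c) = false := by
            rw [← hdup]; exact Bool.of_not_eq_true hd
          have hmem : pvIdOf c ∉ seen := fun hx => by
            rw [(PySem.Set.contains_iff seen (pvIdOf c)).mpr hx] at hc; cases hc
          simp only [PySem.List.len_eq] at hlt
          simp [pvGStep, hmem, hlt]
        rw [List.foldl_cons, hstep]
        refine ih _ _ _ ?_
        intro x
        rw [PySem.Set.mem_add, hInv x]
        constructor
        · rintro (⟨e, he, hx⟩ | hx)
          · exact ⟨e, List.mem_append_left _ he, hx⟩
          · exact ⟨c, List.mem_append_right _ (List.mem_singleton_self c), hx.symm⟩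
        · rintro ⟨e, he, hx⟩
          rcases List.mem_append.mp he with he | he
          · exact Or.inl ⟨e, he, hx⟩
          · rw [List.mem_singleton.mp he] at hx; exact Or.inr hx.symm

-- outer-loop correspondence for one team sweep
lemma pvOuter_corr (k : Int) (tm : List (String × String)) (pool : List PvCand)
    (ts : List (String × List PvCand)) :
    ∀ (sel : List PvCand) (seen : PySem.Set (Option String)) (usage : PySem.Dict String Int),
      pvInv seen sel →
      (∀ p ∈ ts, p.2 = pool.filter (fun c => get_employee_team_id c.1 tm == p.1)) →
      ∃ seen', (ts.map (·.1)).foldl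
            (fun st t => (pool.map (fun c => (get_employee_team_id c.1 tm, c))).foldl (pvStepT k t) st)
            (sel, seen, usage)
          = ((pick_teams_loop k ts sel usage).1, seen', (pick_teams_loop k ts sel usage).2)
        ∧ pvInv seen' (pick_teams_loop k ts sel usage).1 := by
  induction ts with
  | nil => intro sel seen usage hInv _; exact ⟨seen, rfl, hInv⟩
  | cons p ts ih =>
    intro sel seen usage hInv hmem
    obtain ⟨t, ms⟩ := p
    rw [show pick_teams_loop k ((t, ms) :: ts) sel usage
        = if k ≤ PySem.List.len sel then (sel, usage)
          else pick_teams_loop k ts (pick_team_members_loop k t ms sel usage).1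
                 (pick_team_members_loop k t ms sel usage).2 from rfl]
    by_cases hk : k ≤ PySem.List.len sel
    · rw [if_pos hk]
      have hlt : ¬ PySem.List.len sel < k := by omega
      refine ⟨seen, ?_, hInv⟩
      rw [List.map_cons, List.foldl_cons, pvStepT_stall k t _ sel seen usage hlt,
        pvTeams_stall k _ _ sel seen usage hlt]
    · rw [if_neg hk]
      have hms : ms = pool.filter (fun c => get_employee_team_id c.1 tm == t) :=
        (hmem (t, ms) (List.mem_cons_self)).symm ▸ rfl
      rw [List.map_cons, List.foldl_cons, pvStepT_tagged_reduce tm pool k t, ← hms]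
      obtain ⟨seen1, heq, hInv1⟩ := pvInner_corr k t ms sel seen usage hInv
      rw [heq]
      exact ih _ _ _ hInv1 (fun q hq => hmem q (List.mem_cons_of_mem _ hq))

-- no-team sweep correspondence
lemma pvFree_corr (k : Int) (l : List PvCand) :
    ∀ (sel : List PvCand) (seen : PySem.Set (Option String)),
      pvInv seen sel →
      ∃ seen', l.foldl (pvGStepF k) (sel, seen)
          = (pick_no_team_loop k l sel, seen')
        ∧ pvInv seen' (pick_no_team_loop k l sel) := by
  induction l with
  | nil => intro sel seen hInv; exact ⟨seen, rfl, hInv⟩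
  | cons c l ih =>
    intro sel seen hInv
    rw [show pick_no_team_loop k (c :: l) sel
        = if k ≤ PySem.List.len sel then sel
          else if pvSelAnyDup sel c.1 then pick_no_team_loop k l sel
          else pick_no_team_loop k l (sel ++ [c]) from rfl]
    by_cases hk : k ≤ PySem.List.len sel
    · rw [if_pos hk]
      have hlt : ¬ PySem.List.len sel < k := by omega
      refine ⟨seen, ?_, hInv⟩
      rw [List.foldl_cons, show pvGStepF k (sel, seen) c = (sel, seen) by
        simp only [PySem.List.len_eq] at hlt; simp [pvGStepF, hlt],
        pvGStepF_stall k l sel seen hlt]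
    · rw [if_neg hk]
      have hlt : PySem.List.len sel < k := by omega
      have hdup := pvDup_eq sel seen hInv c
      by_cases hd : pvSelAnyDup sel c.1
      · rw [if_pos hd]
        have hmem : pvIdOf c ∈ seen := (PySem.Set.contains_iff seen (pvIdOf c)).mp
          (by rw [← hdup]; exact hd)
        rw [List.foldl_cons, show pvGStepF k (sel, seen) c = (sel, seen) by simp [pvGStepF, hmem]]
        exact ih sel seen hInv
      · rw [if_neg hd]
        have hmem : pvIdOf c ∉ seen := fun hx => by
          have := (PySem.Set.contains_iff seen (pvIdOf c)).mpr hx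
          rw [← hdup] at this; exact hd this
        have hstep : pvGStepF k (sel, seen) c = (sel ++ [c], PySem.Set.add seen (pvIdOf c)) := by
          simp only [PySem.List.len_eq] at hlt
          simp [pvGStepF, hmem, hlt]
        rw [List.foldl_cons, hstep]
        refine ih _ _ ?_
        intro x
        rw [PySem.Set.mem_add, hInv x]
        constructor
        · rintro (⟨e, he, hx⟩ | hx)
          · exact ⟨e, List.mem_append_left _ he, hx⟩
          · exact ⟨c, List.mem_append_right _ (List.mem_singleton_self c), hx.symm⟩
        · rintro ⟨e, he, hx⟩
          rcases List.mem_append.mp he with he | he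
          · exact Or.inl ⟨e, he, hx⟩
          · rw [List.mem_singleton.mp he] at hx; exact Or.inr hx.symm

-- ===== grouping / sizes / team-order characterisation =====

def pvTid (tm : List (String × String)) (c : PvCand) : String := get_employee_team_id c.1 tm

def pvP (tm : List (String × String)) (pool : List PvCand) : List PvCand :=
  pool.filter (fun c => decide (pvTid tm c ≠ ""))

def pvGrpF (tm : List (String × String)) (d : PySem.Dict String (List PvCand)) (c : PvCand) :
    PySem.Dict String (List PvCand) :=
  if pvTid tm c ≠ "" then d.modify (pvTid tm c) [] (· ++ [c]) else d

def pvGrpG (tm : List (String × String)) (nt : List PvCand) (c : PvCand) : List PvCand :=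
  if pvTid tm c == "" then nt ++ [c] else nt

lemma pvGroup_eq (tm : List (String × String)) (pool : List PvCand) :
    group_candidates_by_team pool tm
      = ((pvP tm pool).foldl (fun d c => d.modify (pvTid tm c) [] (· ++ [c])) PySem.Dict.empty,
         pool.filter (fun c => pvTid tm c == "")) := by
  unfold group_candidates_by_team
  have hstep : ∀ (st : PySem.Dict String (List PvCand) × List PvCand), ∀ c ∈ pool,
      (fun (st : PySem.Dict String (List PvCand) × List PvCand) c =>
        let team_id := get_employee_team_id c.1 tm
        if team_id ≠ "" then (st.1.modify team_id [] (· ++ [c]), st.2)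
        else (st.1, st.2 ++ [c])) st c
      = (pvGrpF tm st.1 c, pvGrpG tm st.2 c) := by
    intro st c _
    by_cases h : pvTid tm c ≠ ""
    · have h' : get_employee_team_id c.1 tm ≠ "" := h
      simp [pvGrpF, pvGrpG, pvTid, h']
    · have h' : get_employee_team_id c.1 tm = "" := by
        simpa [pvTid] using h
      simp [pvGrpF, pvGrpG, pvTid, h']
  rw [PySem.List.foldl_congr_mem _ _ _ _ hstep,
    PySem.List.foldl_prod_mk (f := pvGrpF tm) (g := pvGrpG tm)]
  simp only [Prod.mk.injEq]
  constructor
  · show pool.foldl (pvGrpF tm) PySem.Dict.empty = _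
    unfold pvGrpF
    rw [PySem.List.foldl_ite_eq_foldl_filter (p := fun c => pvTid tm c ≠ "")]
    rfl
  · show pool.foldl (pvGrpG tm) [] = _
    unfold pvGrpG
    rw [PySem.List.foldl_if_eq_foldl_filter (p := fun c => pvTid tm c == "")
      (f := fun nt c => nt ++ [c]),
      PySem.List.foldl_append_singleton_eq_self]
    simp

lemma pvGroup_fst_getD (tm : List (String × String)) (pool : List PvCand) (t : String) :
    ((pvP tm pool).foldl (fun d c => d.modify (pvTid tm c) [] (· ++ [c]))
        PySem.Dict.empty).getD t []
      = (pvP tm pool).filter (fun c => pvTid tm c == t) := by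
  have h1 : (pvP tm pool).foldl (fun d c => d.modify (pvTid tm c) [] (· ++ [c])) PySem.Dict.empty
      = ((pvP tm pool).map (fun c => (pvTid tm c, c))).foldl
          (fun d p => d.modify p.1 [] (· ++ [p.2])) PySem.Dict.empty := by
    rw [List.foldl_map]
  rw [h1, PySem.Dict.getD_foldl_modify_append, List.filter_map]
  simp [List.map_map, Function.comp_def]

lemma pvGroup_fst_keys (tm : List (String × String)) (pool : List PvCand) :
    ((pvP tm pool).foldl (fun d c => d.modify (pvTid tm c) [] (· ++ [c]))
        PySem.Dict.empty).keys
      = PySem.Set.ofList ((pvP tm pool).map (pvTid tm)) := by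
  rw [PySem.Dict.keys_foldl_modify_key (key := pvTid tm) (d0 := []) (f := fun _ c => (· ++ [c]))]
  simp [PySem.Set.update_nil_left]

-- double filter collapse for a nonempty team id
lemma pvFilter_collapse (tm : List (String × String)) (pool : List PvCand) (t : String)
    (ht : t ≠ "") :
    (pvP tm pool).filter (fun c => pvTid tm c == t)
      = pool.filter (fun c => pvTid tm c == t) := by
  unfold pvP
  rw [List.filter_filter]
  apply List.filter_congr
  intro c _
  by_cases h : pvTid tm c == t
  · have : pvTid tm c = t := by simpa using h
    simp [this, ht]
  · simp [h]

lemma pvMem_D_ne (tm : List (String × String)) (pool : List PvCand) (t : String)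
    (ht : t ∈ PySem.Set.ofList ((pvP tm pool).map (pvTid tm))) : t ≠ "" := by
  rw [PySem.Set.mem_ofList] at ht
  obtain ⟨c, hc, rfl⟩ := List.mem_map.mp ht
  unfold pvP at hc
  have := List.of_mem_filter hc
  simpa using this

-- B's `tids` comprehension names the same list as the grouped teams, in order
lemma pvTids_eq (tm : List (String × String)) (pool : List PvCand) :
    ((pool.map (fun c => (get_employee_team_id c.1 tm, c))).map Prod.fst).filter (fun t => t != "")
      = (pvP tm pool).map (pvTid tm) := by
  rw [List.map_map]
  have h1 : (Prod.fst ∘ fun c : PvCand => (get_employee_team_id c.1 tm, c)) = pvTid tm := rfl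
  rw [h1, List.filter_map]
  unfold pvP
  congr 1
  apply List.filter_congr
  intro c _
  rw [Bool.eq_iff_iff]
  simp [bne]

lemma pvCount_eq_len (tm : List (String × String)) (pool : List PvCand) (t : String)
    (ht : t ≠ "") :
    ((((pvP tm pool).map (pvTid tm)).count t : Nat) : Int)
      = PySem.List.len (pool.filter (fun c => pvTid tm c == t)) := by
  rw [PySem.List.len_eq]
  congr 1
  rw [← pvFilter_collapse tm pool t ht, ← List.countP_eq_length_filter]
  simp [List.count, List.countP_map, Function.comp_def]

-- ===== the canonical team order =====

def pvD (tm : List (String × String)) (pool : List PvCand) : List String :=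
  PySem.Set.ofList ((pvP tm pool).map (pvTid tm))

def pvPairing (tm : List (String × String)) (pool : List PvCand) (t : String) :
    String × List PvCand := (t, pool.filter (fun c => pvTid tm c == t))

def pvKB (usage : PySem.Dict String Int) (tm : List (String × String)) (pool : List PvCand)
    (t : String) : Lex (Lex (Int × Int) × String) :=
  toLex (toLex (usage.getD t 0, -(PySem.List.len (pool.filter (fun c => pvTid tm c == t)))), t)

lemma pvKB_inj (usage : PySem.Dict String Int) (tm : List (String × String)) (pool : List PvCand)
    {a b : String} (h : pvKB usage tm pool a = pvKB usage tm pool b) : a = b := by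
  have := congrArg (fun z => (ofLex z).2) h
  simpa [pvKB] using this

def pvYs (usage : PySem.Dict String Int) (tm : List (String × String)) (pool : List PvCand) :
    List String :=
  PySem.List.sorted (pvD tm pool) (pvKB usage tm pool) false

lemma pvYs_nodup (usage : PySem.Dict String Int) (tm : List (String × String))
    (pool : List PvCand) : (pvYs usage tm pool).Nodup :=
  (PySem.List.sorted_perm (pvD tm pool) (pvKB usage tm pool) false).nodup_iff.mpr
    (PySem.Set.nodup_ofList _)

lemma pvYs_pairwise_lt (usage : PySem.Dict String Int) (tm : List (String × String))
    (pool : List PvCand) :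
    (pvYs usage tm pool).Pairwise
      (fun a b => pvKB usage tm pool a < pvKB usage tm pool b) := by
  have h1 := PySem.List.sorted_pairwise (pvD tm pool) (pvKB usage tm pool)
  have h2 := pvYs_nodup usage tm pool
  exact (h1.and h2).imp (fun ⟨hle, hne⟩ =>
    lt_of_le_of_ne hle (fun he => hne (pvKB_inj usage tm pool he)))

lemma pvYs_mem (usage : PySem.Dict String Int) (tm : List (String × String))
    (pool : List PvCand) {t : String} (ht : t ∈ pvYs usage tm pool) : t ∈ pvD tm pool := by
  unfold pvYs at ht
  rwa [PySem.List.mem_sorted] at ht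

-- A's ordered team list
lemma pvOrderA_eq (usage : PySem.Dict String Int) (tm : List (String × String))
    (pool : List PvCand) :
    PySem.List.sorted2 (group_candidates_by_team pool tm).1.items
        (pvTeamSortKey1 usage) (·.1) false
      = (pvYs usage tm pool).map (pvPairing tm pool) := by
  rw [pvSorted2_eq_sorted]
  apply PySem.List.sorted_eq_of_perm_of_pairwise_lt
  · -- permutation
    have hitems : (group_candidates_by_team pool tm).1.items
        = (pvD tm pool).map (pvPairing tm pool) := by
      rw [pvGroup_eq]
      have hk := pvGroup_fst_keys tm pool
      have hnd : ((pvP tm pool).foldl (fun d c => d.modify (pvTid tm c) [] (· ++ [c]))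
          PySem.Dict.empty).keys.Nodup := by
        rw [hk]; exact PySem.Set.nodup_ofList _
      rw [PySem.Dict.items_eq_map_keys _ hnd []]
      rw [hk]
      apply List.map_congr_left
      intro t htD
      have hne : t ≠ "" := pvMem_D_ne tm pool t htD
      rw [pvGroup_fst_getD, pvFilter_collapse tm pool t hne]
      rfl
    rw [hitems]
    exact ((PySem.List.sorted_perm (pvD tm pool) (pvKB usage tm pool) false).map _)
  · -- strictly increasing keys
    rw [List.pairwise_map]
    refine (pvYs_pairwise_lt usage tm pool).imp ?_
    intro a b h
    simpa [pvPairing, pvTeamSortKey1, pvKB] using h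

-- right- and left-nested three-component Lex orders agree
lemma pvLex3_iff {κ₁ κ₂ κ₃ : Type} [LinearOrder κ₁] [LinearOrder κ₂] [LinearOrder κ₃]
    (x1 y1 : κ₁) (x2 y2 : κ₂) (x3 y3 : κ₃) :
    toLex (x1, toLex (x2, x3)) < toLex (y1, toLex (y2, y3))
      ↔ toLex (toLex (x1, x2), x3) < toLex (toLex (y1, y2), y3) := by
  simp only [Prod.Lex.toLex_lt_toLex, toLex_inj, Prod.mk.injEq]
  tauto

-- B's ordered team-id list
lemma pvOrderB_eq (usage : PySem.Dict String Int) (tm : List (String × String))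
    (pool : List PvCand) :
    PySem.List.sorted (PySem.List.dedup ((pvP tm pool).map (pvTid tm)))
        (fun t => toLex (usage.getD t 0,
          toLex (-((((pvP tm pool).map (pvTid tm)).count t : Nat) : Int), t))) false
      = pvYs usage tm pool := by
  rw [PySem.List.dedup_eq_ofList]
  apply PySem.List.sorted_eq_of_perm_of_pairwise_lt
  · exact PySem.List.sorted_perm (pvD tm pool) (pvKB usage tm pool) false
  · refine List.Pairwise.imp_of_mem ?_ (pvYs_pairwise_lt usage tm pool)
    intro a b ha hb h
    rw [pvLex3_iff,
      pvCount_eq_len tm pool a (pvMem_D_ne tm pool a (pvYs_mem usage tm pool ha)),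
      pvCount_eq_len tm pool b (pvMem_D_ne tm pool b (pvYs_mem usage tm pool hb))]
    exact h

-- A's phase guards are redundant (the loops re-check the quota)
lemma pvNoteam_if (k : Int) (l : List PvCand) (sel : List PvCand) :
    (if PySem.List.len sel < k then pick_no_team_loop k l sel else sel)
      = pick_no_team_loop k l sel := by
  by_cases h : PySem.List.len sel < k
  · rw [if_pos h]
  · rw [if_neg h, pick_no_team_loop_skip k l sel (by omega)]

lemma pvTeams_if (k : Int) (ts : List (String × List PvCand)) (sel : List PvCand)
    (usage : PySem.Dict String Int) :
    (if PySem.List.len sel < k then pick_teams_loop k ts sel usage else (sel, usage))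
      = pick_teams_loop k ts sel usage := by
  by_cases h : PySem.List.len sel < k
  · rw [if_pos h]
  · rw [if_neg h, pick_teams_loop_skip k ts sel usage (by omega)]

lemma pvSlice_of_le (sel : List PvCand) (k : Int) (h : sel.length ≤ k.toNat) :
    PySem.List.slice sel none (some k) = sel := by
  by_cases hk : 0 ≤ k
  · rw [PySem.List.slice_to sel hk]; exact List.take_of_length_le h
  · have hnil : sel = [] := by
      have : sel.length = 0 := by omega
      exact List.eq_nil_of_length_eq_zero this
    subst hnil
    simp [PySem.List.slice]

lemma pvPairing_mem (tm : List (String × String)) (pool : List PvCand) (ys : List String)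
    (p : String × List PvCand) (hp : p ∈ ys.map (pvPairing tm pool)) :
    p.2 = pool.filter (fun c => get_employee_team_id c.1 tm == p.1) := by
  obtain ⟨t, _, rfl⟩ := List.mem_map.mp hp
  rfl

lemma pvMap_fst_pairing (tm : List (String × String)) (pool : List PvCand) (ys : List String) :
    (ys.map (pvPairing tm pool)).map (·.1) = ys := by
  rw [List.map_map]
  simp [pvPairing, Function.comp_def]

-- one pool iteration of B = one team phase + one no-team phase of A
lemma pvPool_corr (k : Int) (tm : List (String × String)) (eac : List (String × Int))
    (raw : List PvCand) (sel : List PvCand) (seen : PySem.Set (Option String))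
    (usage : PySem.Dict String Int) (hInv : pvInv seen sel) :
    ∃ seen',
      pvProcessPool k tm eac raw (sel, seen, usage)
        = (pick_no_team_loop k
             ((sort_candidate_pool raw eac).filter (fun c => get_employee_team_id c.1 tm == ""))
             (pick_teams_loop k
               ((pvYs usage tm (sort_candidate_pool raw eac)).map
                 (pvPairing tm (sort_candidate_pool raw eac))) sel usage).1,
           seen',
           (pick_teams_loop k
             ((pvYs usage tm (sort_candidate_pool raw eac)).map
               (pvPairing tm (sort_candidate_pool raw eac))) sel usage).2)
      ∧ pvInv seen'
          (pick_no_team_loop k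
            ((sort_candidate_pool raw eac).filter (fun c => get_employee_team_id c.1 tm == ""))
            (pick_teams_loop k
              ((pvYs usage tm (sort_candidate_pool raw eac)).map
                (pvPairing tm (sort_candidate_pool raw eac))) sel usage).1) := by
  simp only [pvProcessPool]
  rw [pvPoolSort_eq]
  set pool := sort_candidate_pool raw eac with hpool
  have htagof : (fun c : PvCand => (pvTeamOfB tm c.1, c))
      = fun c : PvCand => (get_employee_team_id c.1 tm, c) := by
    funext c; rw [pvTeamOfB_eq]
  rw [htagof, pvTids_eq tm pool, pvTeamSort_eq, pvOrderB_eq usage tm pool]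
  set ts := (pvYs usage tm pool).map (pvPairing tm pool) with hts
  rw [← pvMap_fst_pairing tm pool (pvYs usage tm pool), ← hts]
  obtain ⟨seen1, hB1, hInv1⟩ := pvOuter_corr k tm pool ts sel seen usage hInv
    (fun p hp => pvPairing_mem tm pool _ p hp)
  rw [hB1]
  rw [pvStepN_tagged_reduce tm pool k]
  obtain ⟨seen2, hB2, hInv2⟩ := pvFree_corr k
    (pool.filter (fun c => get_employee_team_id c.1 tm == ""))
    (pick_teams_loop k ts sel usage).1 seen1 hInv1
  rw [hB2]
  exact ⟨seen2, rfl, hInv2⟩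

theorem pv_main (pc sc : List PvCand) (k : Int) (tuc : List (String × Int))
    (tm : List (String × String)) (eac : List (String × Int)) :
    pick_best_candidates_for_requirement pc sc k tuc tm eac
      = pick_best_candidates_for_requirement_alt pc sc k tuc tm eac := by
  set pool1 := sort_candidate_pool pc eac with hp1
  set pool2 := sort_candidate_pool sc eac with hp2
  set usage0 := PySem.Dict.mk tuc with hu0
  set ts1 := (pvYs usage0 tm pool1).map (pvPairing tm pool1) with hts1
  set r1 := pick_teams_loop k ts1 [] usage0 with hr1
  set nt1 := pool1.filter (fun c => get_employee_team_id c.1 tm == "") with hnt1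
  set sel2 := pick_no_team_loop k nt1 r1.1 with hsel2
  set ts2 := (pvYs r1.2 tm pool2).map (pvPairing tm pool2) with hts2
  set r3 := pick_teams_loop k ts2 sel2 r1.2 with hr3
  set nt2 := pool2.filter (fun c => get_employee_team_id c.1 tm == "") with hnt2
  set sel4 := pick_no_team_loop k nt2 r3.1 with hsel4
  have hif2 : (if PySem.List.len r1.1 < k then pick_no_team_loop k nt1 r1.1 else r1.1) = sel2 := by
    rw [hsel2]; exact pvNoteam_if k nt1 r1.1
  have hif3 : (if PySem.List.len sel2 < k then pick_teams_loop k ts2 sel2 r1.2 else (sel2, r1.2)) = r3 := by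
    rw [hr3]; exact pvTeams_if k ts2 sel2 r1.2
  have hif4 : (if PySem.List.len r3.1 < k then pick_no_team_loop k nt2 r3.1 else r3.1) = sel4 := by
    rw [hsel4]; exact pvNoteam_if k nt2 r3.1
  -- A computes sel4[:k]
  have hA : pick_best_candidates_for_requirement pc sc k tuc tm eac
      = PySem.List.slice sel4 none (some k) := by
    simp only [pick_best_candidates_for_requirement]
    rw [pvOrderA_eq usage0 tm pool1, ← hts1,
      show (group_candidates_by_team pool1 tm).2 = nt1 by rw [pvGroup_eq]; rfl,
      show (group_candidates_by_team pool2 tm).2 = nt2 by rw [pvGroup_eq]; rfl,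
      ← hr1, hif2, pvOrderA_eq r1.2 tm pool2, ← hts2, hif3, hif4]
  -- B computes sel4
  have hInv0 : pvInv PySem.Set.empty [] := by
    intro x; simp [PySem.Set.empty]
  obtain ⟨seen1, hB1, hInv1⟩ := pvPool_corr k tm eac pc [] PySem.Set.empty usage0 hInv0
  rw [← hp1, ← hts1, ← hr1, ← hnt1, ← hsel2] at hB1 hInv1
  obtain ⟨seen3, hB3, hInv3⟩ := pvPool_corr k tm eac sc sel2 seen1 r1.2 hInv1
  rw [← hp2, ← hts2, ← hr3, ← hnt2, ← hsel4] at hB3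
  have hB : pick_best_candidates_for_requirement_alt pc sc k tuc tm eac = sel4 := by
    simp only [pick_best_candidates_for_requirement_alt, List.foldl_cons, List.foldl_nil]
    rw [← hu0, hB1, hB3]
  rw [hA, hB]
  -- the quota bound: A's slice is the identity
  have hlen : sel4.length ≤ k.toNat := by
    rw [hsel4]
    apply pick_no_team_loop_len
    rw [hr3]
    apply pick_teams_loop_len
    rw [hsel2]
    apply pick_no_team_loop_len
    rw [hr1]
    apply pick_teams_loop_len
    simp
  exact pvSlice_of_le sel4 k hlen

-- ===== VERDICT (by name: the statement is the Claim_ definition above) =====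
theorem pick_best_candidates_for_requirement_spec : Claim_equal_pick_best_candidates_for_requirement := by
  intro pc sc k tuc tm eac _
  unfold Spec_pick_best_candidates_for_requirement
  exact pv_main pc sc k tuc tm eac
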